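-- pv_equiv track=rewrite | github.com/baileym4/mines | lab.py | get_all_coords
-- ===== SOURCE A (Python) =====
-- def get_all_coords(dimension):
--     """
--     gets all possible coords in a given board
--     """
--     if len(dimension) == 1:
--         return [(i,) for i in range(dimension[0])]
--     else:
--         coord_list = []
--         coords = get_all_coords(dimension[1:])
--         first = dimension[0]
--         for coord in coords:
--             for val in range(first):
--                 coord_list.append((val,) + coord)
--         return coord_list
-- ===== SOURCE B (Python) =====
-- def get_all_coords(dimension):
--     """
--     gets all possible coords in a given board
--     """
--     total = 1
--     for d in dimension:
--         total *= d if d > 0 else 0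
--     coords = []
--     for idx in range(total):
--         coord = []
--         rem = idx
--         for d in dimension:
--             coord.append(rem % d)
--             rem //= d
--         coords.append(tuple(coord))
--     return coords
-- ===== Notes on version B (the rewrite author's own statement) =====
-- stated objective: alternative
-- what changed: Replaces A's tail recursion over dimension[1:] (which rebuilds a coordinate list per axis by nested append loops) with mixed-radix index decoding: compute total = product of the axis sizes (0 for non-positive axes) and decode each index in range(total) into a coordinate via % and //.
import Mathlib
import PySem

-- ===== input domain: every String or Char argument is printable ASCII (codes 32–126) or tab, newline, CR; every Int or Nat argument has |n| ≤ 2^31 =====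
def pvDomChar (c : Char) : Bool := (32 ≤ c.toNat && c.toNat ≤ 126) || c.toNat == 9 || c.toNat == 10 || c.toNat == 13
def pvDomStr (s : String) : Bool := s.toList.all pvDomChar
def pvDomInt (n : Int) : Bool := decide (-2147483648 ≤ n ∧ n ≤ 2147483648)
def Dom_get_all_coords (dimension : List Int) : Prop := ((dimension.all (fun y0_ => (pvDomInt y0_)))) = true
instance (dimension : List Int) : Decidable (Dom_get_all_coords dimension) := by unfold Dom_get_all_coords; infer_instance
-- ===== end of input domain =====

-- B replaces A's tail recursion by mixed-radix index decoding: total = ∏ dims, each index is decoded into a coordinate.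

-- ===== PORT A =====
-- recursion on dimension[1:]; the [] case never occurs under Pre_ (Python recurses forever there, RecursionError)
def get_all_coords : List Int → List (List Int)
  | [] => []
  | [d] => (PySem.List.pyRange 0 d 1).map (fun i => [i])
  | d :: e :: rest =>
      (get_all_coords (e :: rest)).foldl
        (fun acc coord => acc ++ (PySem.List.pyRange 0 d 1).map (fun val => val :: coord)) []

-- ===== PORT B =====
def get_all_coords_alt (dimension : List Int) : List (List Int) :=
  let total := dimension.foldl (fun acc d => acc * (if 0 < d then d else 0)) 1
  (PySem.List.pyRange 0 total 1).map (fun idx =>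
    (dimension.foldl
      (fun (p : List Int × Int) d => (p.1 ++ [PySem.Int.mod p.2 d], PySem.Int.floordiv p.2 d))
      (([] : List Int), idx)).1)

-- ===== PRECONDITION & SPEC =====
-- Pre_ excludes only the empty list, on which A raises RecursionError.
def Pre_get_all_coords (dimension : List Int) : Prop := dimension ≠ []
instance (dimension : List Int) : Decidable (Pre_get_all_coords dimension) := by
  unfold Pre_get_all_coords; infer_instance
def pvWitness_get_all_coords : List Int := [2, 3]

def Spec_get_all_coords (dimension : List Int) (out : List (List Int)) : Prop := out = get_all_coords_alt dimension
instance (dimension : List Int) (out : List (List Int)) : Decidable (Spec_get_all_coords dimension out) := by unfold Spec_get_all_coords; infer_instance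

-- ===== CLAIM (what is proved, stated in full; the proofs are below) =====
def Claim_equal_get_all_coords : Prop := ∀ (dimension : List Int), Dom_get_all_coords dimension → Pre_get_all_coords dimension → Spec_get_all_coords dimension (get_all_coords dimension)

-- ===== LEMMAS AND PROOFS =====

-- proof-side abbreviations for the two folds inside get_all_coords_alt
def pvG (d : Int) : Int := if 0 < d then d else 0

def pvTotal (l : List Int) : Int := l.foldl (fun acc d => acc * (if 0 < d then d else 0)) 1

def pvDecode (l : List Int) (idx : Int) : List Int :=
  (l.foldl
    (fun (p : List Int × Int) d => (p.1 ++ [PySem.Int.mod p.2 d], PySem.Int.floordiv p.2 d))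
    (([] : List Int), idx)).1

theorem alt_eq (l : List Int) :
    get_all_coords_alt l = (PySem.List.pyRange 0 (pvTotal l) 1).map (pvDecode l) := rfl

theorem pvG_nonneg (d : Int) : 0 ≤ pvG d := by unfold pvG; split <;> omega

theorem foldl_mul_shift (l : List Int) (a b : Int) :
    l.foldl (fun acc d => acc * (if 0 < d then d else 0)) (a * b)
      = a * l.foldl (fun acc d => acc * (if 0 < d then d else 0)) b := by
  induction l generalizing b with
  | nil => rfl
  | cons d l ih => simp only [List.foldl_cons, mul_assoc, ih]

theorem pvTotal_cons (d : Int) (l : List Int) :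
    pvTotal (d :: l) = pvG d * pvTotal l := by
  unfold pvTotal pvG
  rw [List.foldl_cons, show (1 : Int) * (if 0 < d then d else 0) = (if 0 < d then d else 0) * 1 by ring,
      foldl_mul_shift]

theorem pvTotal_nonneg (l : List Int) : 0 ≤ pvTotal l := by
  induction l with
  | nil => norm_num [pvTotal]
  | cons d l ih => rw [pvTotal_cons]; exact mul_nonneg (pvG_nonneg d) ih

theorem pvDecode_acc (l : List Int) : ∀ (acc : List Int) (idx : Int),
    (l.foldl
      (fun (p : List Int × Int) d => (p.1 ++ [PySem.Int.mod p.2 d], PySem.Int.floordiv p.2 d))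
      (acc, idx)).1
    = acc ++ pvDecode l idx := by
  induction l with
  | nil => intro acc idx; simp [pvDecode]
  | cons d l ih =>
    intro acc idx
    unfold pvDecode
    simp only [List.foldl_cons, List.nil_append]
    rw [ih, ih]
    simp [List.append_assoc]

theorem pvDecode_cons (d : Int) (l : List Int) (idx : Int) :
    pvDecode (d :: l) idx
      = PySem.Int.mod idx d :: pvDecode l (PySem.Int.floordiv idx d) := by
  unfold pvDecode
  rw [List.foldl_cons]
  simpa using pvDecode_acc l [PySem.Int.mod idx d] (PySem.Int.floordiv idx d)

theorem range_mul_nat (d t : Nat) :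
    List.range (d * t) = (List.range t).flatMap (fun q => (List.range d).map (fun v => q * d + v)) := by
  induction t with
  | zero => simp
  | succ t ih =>
    rw [Nat.mul_succ, List.range_add, ih, List.range_succ, List.flatMap_append]
    simp only [List.flatMap_cons, List.flatMap_nil, List.append_nil]
    congr 1
    exact List.map_congr_left (fun v _ => by ring)

theorem pyRange_mul (d t : Int) (hd : 0 ≤ d) (ht : 0 ≤ t) :
    PySem.List.pyRange 0 (d * t) 1
      = (PySem.List.pyRange 0 t 1).flatMap
          (fun q => (PySem.List.pyRange 0 d 1).map (fun v => q * d + v)) := by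
  obtain ⟨dn, rfl⟩ : ∃ n : Nat, d = (n : Int) := ⟨d.toNat, (Int.toNat_of_nonneg hd).symm⟩
  obtain ⟨tn, rfl⟩ : ∃ n : Nat, t = (n : Int) := ⟨t.toNat, (Int.toNat_of_nonneg ht).symm⟩
  rw [show ((dn : Int) * (tn : Int)) = ((dn * tn : Nat) : Int) by push_cast; ring]
  rw [PySem.List.pyRange_zero_natCast, PySem.List.pyRange_zero_natCast,
      PySem.List.pyRange_zero_natCast, range_mul_nat]
  simp only [List.map_flatMap, List.flatMap_map]
  refine List.flatMap_congr ?_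
  intro q _
  simp only [List.map_map]
  refine List.map_congr_left ?_
  intro v _
  simp only [Function.comp_apply]
  push_cast
  ring

theorem alt_cons (d : Int) (rest : List Int) :
    get_all_coords_alt (d :: rest)
      = (get_all_coords_alt rest).flatMap
          (fun c => (PySem.List.pyRange 0 d 1).map (fun v => v :: c)) := by
  rw [alt_eq, alt_eq, pvTotal_cons]
  by_cases hd : 0 < d
  · have hgd : pvG d = d := by unfold pvG; simp [hd]
    rw [hgd, pyRange_mul d (pvTotal rest) (le_of_lt hd) (pvTotal_nonneg rest)]
    simp only [List.map_flatMap, List.flatMap_map]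
    refine List.flatMap_congr ?_
    intro q hq
    have hq0 : 0 ≤ q := (PySem.List.mem_pyRange_one.mp hq).1
    simp only [List.map_map]
    refine List.map_congr_left ?_
    intro v hv
    have hv0 : 0 ≤ v := (PySem.List.mem_pyRange_one.mp hv).1
    have hvd : v < d := (PySem.List.mem_pyRange_one.mp hv).2
    simp only [Function.comp_apply]
    rw [pvDecode_cons]
    have hmod : PySem.Int.mod (q * d + v) d = v := by
      rw [PySem.Int.mod_eq_emod_of_pos hd, show q * d + v = v + d * q by ring,
          Int.add_mul_emod_self_left, Int.emod_eq_of_lt hv0 hvd]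
    have hdiv : PySem.Int.floordiv (q * d + v) d = q := by
      rw [PySem.Int.floordiv_eq_ediv_of_pos hd, show q * d + v = v + d * q by ring,
          Int.add_mul_ediv_left v q (ne_of_gt hd), Int.ediv_eq_zero_of_lt hv0 hvd, zero_add]
    rw [hmod, hdiv]
  · have hgd : pvG d = 0 := by unfold pvG; simp [hd]
    have hrd : PySem.List.pyRange 0 d 1 = [] :=
      PySem.List.pyRange_one_eq_nil (by omega)
    simp [hgd, hrd, PySem.List.pyRange_one_eq_nil (le_refl (0 : Int))]

theorem ports_agree : ∀ (dimension : List Int), dimension ≠ [] →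
    get_all_coords dimension = get_all_coords_alt dimension := by
  intro dimension
  induction dimension with
  | nil => intro h; exact absurd rfl h
  | cons d rest ih =>
    intro _
    cases rest with
    | nil =>
      rw [alt_cons]
      have : get_all_coords_alt [] = [[]] := by decide
      simp [this, get_all_coords]
    | cons e rs =>
      rw [alt_cons, ← ih (by simp)]
      simp [get_all_coords, List.flatMap]

-- ===== VERDICT (by name: the statement is the Claim_ definition above) =====
theorem get_all_coords_spec : Claim_equal_get_all_coords := by
  intro dimension _ hpre
  exact ports_agree dimension hpre
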